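-- pv_equiv track=rewrite | github.com/deepak01-Hacker/DSABusted | Graph/Two Clique Problem (Check if Graph can be divided in two Cliques).py | Biapertite
-- ===== SOURCE A (Python) =====
-- def isPossibleToClique(graph,src,color):
--     V = len(graph)
--     color[src] = 1
--     queue = []
--     queue.append(src)
--     while(queue):
--         u = queue.pop(0)
--         for v in range(V):
--             if graph[u][v] and color[v] == -1:
--                 color[v] = 1-color[u]
--                 queue.append(v)
--             elif graph[u][v] and color[v] == color[u]:
--                 return False
--     return True
--
-- def Biapertite(G):
--     V = len(G)
--     GC = [[None] * V for i in range(V)]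
--     for i in range(V):
--         for j in range(V):
--             GC[i][j] = not G[i][j] if i != j else 0
--     graph = GC
--     color = [-1]*len(graph)
--     for u in range(len(graph)):
--         if color[u] == -1:
--             if isPossibleToClique(graph,u,color) == False:
--                 return False
--     return True
-- ===== SOURCE B (Python) =====
-- def Biapertite(G):
--     V = len(G)
--     parent = list(range(V))
--     parity = [False] * V
--
--     def find(v):
--         p = False
--         while parent[v] != v:
--             p = (p != parity[v])
--             v = parent[v]
--         return v, p
--
--     for i in range(V):
--         for j in range(V):
--             if i != j and not G[i][j]:
--                 ri, pi = find(i)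
--                 rj, pj = find(j)
--                 if ri == rj:
--                     if pi == pj:
--                         return False
--                 else:
--                     q = (pi == pj)
--                     if ri < rj:
--                         parent[rj] = ri
--                         parity[rj] = q
--                     else:
--                         parent[ri] = rj
--                         parity[ri] = q
--     return True
-- ===== Notes on version B (the rewrite author's own statement) =====
-- stated objective: alternative
-- what changed: Replaces A's materialized V x V complement matrix plus FIFO-queue BFS 2-coloring with a parity (weighted) union-find over the vertices: each complement pair (i,j) is unioned with opposite-side parity, and a conflict is reported when both endpoints already share a root with equal parity.
-- outside the precondition, e.g. on Biapertite([[1, 1], [0, 1]]): A returns False, B returns True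
import Mathlib
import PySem

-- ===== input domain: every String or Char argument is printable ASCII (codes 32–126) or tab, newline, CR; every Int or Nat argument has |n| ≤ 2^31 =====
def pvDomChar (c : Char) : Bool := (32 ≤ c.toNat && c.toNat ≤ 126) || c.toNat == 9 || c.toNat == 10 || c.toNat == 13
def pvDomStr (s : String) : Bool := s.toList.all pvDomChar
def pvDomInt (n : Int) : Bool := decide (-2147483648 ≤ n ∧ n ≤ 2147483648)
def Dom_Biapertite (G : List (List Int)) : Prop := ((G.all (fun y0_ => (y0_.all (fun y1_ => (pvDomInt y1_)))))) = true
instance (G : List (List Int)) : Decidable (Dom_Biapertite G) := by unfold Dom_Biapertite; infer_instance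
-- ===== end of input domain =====

-- B replaces A's materialized V×V complement matrix + FIFO-queue BFS 2-coloring by a
-- parity (weighted) union-find over the vertices (different data structure, same verdict
-- on symmetric adjacency matrices); objective: alternative.

-- ===== PORT A =====

-- graph[u][v] (in-range on every use; getD is exact there)
def pvAdj (graph : List (List Bool)) (u v : Nat) : Bool := (graph.getD u []).getD v false

-- GC[i][j] = (not G[i][j]) if i != j else 0; only its truthiness is ever used, so Bool entries
def pvGC (G : List (List Int)) : List (List Bool) :=
  (List.range G.length).map (fun i =>
    (List.range G.length).map (fun j =>
      if i ≠ j then ((G.getD i []).getD j 0) == 0 else false))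

-- one iteration of 'for v in range(V)'; none = the 'return False' already happened
def pvAStep (graph : List (List Bool)) (u : Nat)
    (st : Option (List Int × List Nat)) (v : Nat) : Option (List Int × List Nat) :=
  match st with
  | none => none
  | some (color, pushed) =>
    if pvAdj graph u v && (color.getD v 0 == -1) then
      some (color.set v (1 - color.getD u 0), pushed ++ [v])
    else if pvAdj graph u v && (color.getD v 0 == color.getD u 0) then none
    else some (color, pushed)

-- 'while queue:' — fuel (V+1)²+1 is a totality guard only; it is proved sufficient below
def pvALoop (graph : List (List Bool)) (V : Nat) : Nat → List Int → List Nat → Bool × List Int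
  | 0, color, _ => (true, color)
  | _+1, color, [] => (true, color)
  | fuel+1, color, u :: qs =>
    match (List.range V).foldl (pvAStep graph u) (some (color, [])) with
    | none => (false, color)
    | some (color', pushed) => pvALoop graph V fuel color' (qs ++ pushed)

def isPossibleToClique (graph : List (List Bool)) (src : Nat) (color : List Int) :
    Bool × List Int :=
  let V := graph.length
  pvALoop graph V ((V + 1) * (V + 1) + 1) (color.set src 1) [src]

def Biapertite (G : List (List Int)) : Bool :=
  let graph := pvGC G
  ((List.range graph.length).foldl
    (fun (st : Option (List Int)) u =>
      match st with
      | none => none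
      | some color =>
        if color.getD u 0 == -1 then
          match isPossibleToClique graph u color with
          | (true, color') => some color'
          | (false, _) => none
        else some color)
    (some (List.replicate graph.length (-1 : Int)))).isSome

-- ===== PORT B =====

-- 'while parent[v] != v: p = (p != parity[v]); v = parent[v]' — fuel length+1 is a
-- totality guard only (parent[v] <= v always holds, proved below, so it suffices);
-- parent[v]/parity[v] are in range on every admitted use, getD is exact there
def pvFindGo (parent : List Nat) (parity : List Bool) :
    Nat → Nat → Bool → Nat × Bool
  | 0, v, p => (v, p)
  | fuel+1, v, p =>
    if parent.getD v v ≠ v then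
      pvFindGo parent parity fuel (parent.getD v v) (p != parity.getD v false)
    else (v, p)

def pvFind (parent : List Nat) (parity : List Bool) (v : Nat) : Nat × Bool :=
  pvFindGo parent parity (parent.length + 1) v false

-- body of the double loop: 'if i != j and not G[i][j]: …'; none = 'return False' happened
def pvUFStep (G : List (List Int)) (i : Nat)
    (st : Option (List Nat × List Bool)) (j : Nat) : Option (List Nat × List Bool) :=
  match st with
  | none => none
  | some (parent, parity) =>
    if (i != j) && ((G.getD i []).getD j 0 == 0) then
      let ri := (pvFind parent parity i).1
      let pi := (pvFind parent parity i).2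
      let rj := (pvFind parent parity j).1
      let pj := (pvFind parent parity j).2
      if ri = rj then
        if pi = pj then none else some (parent, parity)
      else
        if ri < rj then some (parent.set rj ri, parity.set rj (pi == pj))
        else some (parent.set ri rj, parity.set ri (pi == pj))
    else some (parent, parity)

def Biapertite_alt (G : List (List Int)) : Bool :=
  ((List.range G.length).foldl
    (fun st i => (List.range G.length).foldl (pvUFStep G i) st)
    (some (List.range G.length, List.replicate G.length false))).isSome

-- ===== PRECONDITION & SPEC =====

-- Python A reads G[i][j] for every i ≠ j with i, j < len(G) (the diagonal is never read) and
-- raises IndexError when such a j is out of range of row i; Pre_ excludes exactly those inputs.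
-- Pre_ also excludes matrices whose truthiness is not symmetric (directed 'graphs', outside the
-- natural domain of an undirected-adjacency-matrix function): there A's verdict depends on the
-- accidental traversal order of its BFS and either answer is as defensible as the other.
def Pre_Biapertite (G : List (List Int)) : Prop :=
  (∀ i, i < G.length → ∀ j, j < G.length → i ≠ j → j < (G.getD i []).length) ∧
  (∀ i, i < G.length → ∀ j, j < G.length → i ≠ j →
    (((G.getD i []).getD j 0 = 0) ↔ ((G.getD j []).getD i 0 = 0)))
instance (G : List (List Int)) : Decidable (Pre_Biapertite G) := by
  unfold Pre_Biapertite; infer_instance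

def pvWitness_Biapertite : List (List Int) := [[1, 0], [0, 1]]

def Spec_Biapertite (G : List (List Int)) (out : Bool) : Prop := out = Biapertite_alt G
instance (G : List (List Int)) (out : Bool) : Decidable (Spec_Biapertite G out) := by
  unfold Spec_Biapertite; infer_instance

-- ===== CLAIM (what is proved, stated in full; the proofs are below) =====
def Claim_equal_Biapertite : Prop :=
  ∀ (G : List (List Int)), Dom_Biapertite G → Pre_Biapertite G →
    Spec_Biapertite G (Biapertite G)

-- ===== LEMMAS AND PROOFS =====

-- ---- the common specification both programs decide ----

-- the complement edge 'i != j and not G[i][j]', read off G directly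
def pvEdge (G : List (List Int)) (u v : Nat) : Bool :=
  (u != v) && ((G.getD u []).getD v 0 == 0)

def PVProper (G : List (List Int)) (χ : Nat → Bool) : Prop :=
  ∀ u v, u < G.length → v < G.length → pvEdge G u v = true → χ u ≠ χ v

def PVP (G : List (List Int)) : Prop := ∃ χ, PVProper G χ

-- ---- small getD/set/count facts ----

theorem pv_getD_set_self (c : List Int) (v : Nat) (x : Int) (h : v < c.length) :
    (c.set v x).getD v 0 = x := by
  simp [List.getD_eq_getElem?_getD, h]

theorem pv_getD_set_ne (c : List Int) (v w : Nat) (x : Int) (h : w ≠ v) :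
    (c.set v x).getD w 0 = c.getD w 0 := by
  simp [List.getD_eq_getElem?_getD, List.getElem?_set_ne (Ne.symm h)]

theorem pv_getD_replicate (n v : Nat) :
    ((List.replicate n (-1 : Int)).getD v 0 = -1) ∨ ((List.replicate n (-1 : Int)).getD v 0 = 0) := by
  by_cases h : v < n
  · left; simp [List.getD_eq_getElem?_getD, h]
  · right; simp [List.getD_eq_getElem?_getD, h]

theorem pv_count_set (c : List Int) (v : Nat) (x : Int)
    (hv : v < c.length) (hold : c.getD v 0 = -1) (hx : x ≠ -1) :
    (c.set v x).count (-1) + 1 = c.count (-1) := by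
  induction c generalizing v with
  | nil => simp at hv
  | cons a as ih =>
    cases v with
    | zero =>
      simp [List.getD] at hold
      subst hold
      simp [hx]
    | succ v =>
      simp at hv
      have := ih v hv (by simpa [List.getD] using hold)
      simp [List.count_cons]
      omega

theorem pv_unc_le (c : List Int) : c.count (-1) ≤ c.length := List.count_le_length

-- ---- proof-layer state predicates for A's BFS ----

def PVInR (c : List Int) : Prop :=
  ∀ v, c.getD v 0 = -1 ∨ c.getD v 0 = 0 ∨ c.getD v 0 = 1

def PVClosed (G : List (List Int)) (c : List Int) (q : List Nat) : Prop :=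
  ∀ u, u < G.length → c.getD u 0 ≠ -1 → u ∉ q →
    ∀ v, v < G.length → pvEdge G u v = true →
      c.getD v 0 ≠ -1 ∧ c.getD v 0 ≠ c.getD u 0

def PVQok (G : List (List Int)) (c : List Int) (q : List Nat) : Prop :=
  ∀ u ∈ q, u < G.length ∧ c.getD u 0 ≠ -1

def PVInvL (G : List (List Int)) (c : List Int) (q : List Nat) : Prop :=
  c.length = G.length ∧ PVInR c ∧ PVQok G c q

def PVInv (G : List (List Int)) (c : List Int) (q : List Nat) : Prop :=
  PVInvL G c q ∧ PVClosed G c q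

def pvUnc (c : List Int) : Nat := c.count (-1)

def pvMeasure (G : List (List Int)) (c : List Int) (q : List Nat) : Nat :=
  (G.length + 1) * pvUnc c + q.length

def PVClash (G : List (List Int)) (F : List Int) : Prop :=
  ∃ a b, a < G.length ∧ b < G.length ∧ pvEdge G a b = true ∧
    F.getD a 0 ≠ -1 ∧ F.getD a 0 = F.getD b 0

-- agreement of a total 2-coloring with A's partial color array
def PVAgrees (G : List (List Int)) (χ : Nat → Bool) (c : List Int) : Prop :=
  ∀ v, v < G.length → c.getD v 0 ≠ -1 → χ v = (c.getD v 0 == 1)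

-- ---- A's full (conflict-ignoring) run: a plain (non-Option) mirror of pvAStep ----

def pvBStep (G : List (List Int)) (u : Nat)
    (st : List Int × List Nat) (v : Nat) : List Int × List Nat :=
  if pvEdge G u v && (st.1.getD v 0 == -1) then
    (st.1.set v (1 - st.1.getD u 0), st.2 ++ [v])
  else st

def pvAFLoop (G : List (List Int)) (V : Nat) : Nat → List Int → List Nat → List Int
  | 0, c, _ => c
  | _+1, c, [] => c
  | fuel+1, c, u :: qs =>
    match (List.range V).foldl (pvBStep G u) (c, []) with
    | (c', p) => pvAFLoop G V fuel c' (qs ++ p)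

def pvFuelA (G : List (List Int)) : Nat := (G.length + 1) * (G.length + 1) + 1

def pvFullSeed (G : List (List Int)) (c : List Int) (u : Nat) : List Int :=
  if c.getD u 0 == -1 then pvAFLoop G G.length (pvFuelA G) (c.set u 1) [u] else c

def pvAFC (G : List (List Int)) : List Int :=
  (List.range G.length).foldl (pvFullSeed G) (List.replicate G.length (-1 : Int))

def pvOptSeed (G : List (List Int)) (st : Option (List Int)) (u : Nat) : Option (List Int) :=
  match st with
  | none => none
  | some color =>
    if color.getD u 0 == -1 then
      match pvALoop (pvGC G) G.length (pvFuelA G) (color.set u 1) [u] with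
      | (true, c') => some c'
      | (false, _) => none
    else some color

-- ---- bridges between A's port syntax and the proof layer ----

theorem pv_length_pvGC (G : List (List Int)) : (pvGC G).length = G.length := by
  simp [pvGC]

theorem pv_adj_eq (G : List (List Int)) (u v : Nat)
    (hu : u < G.length) (hv : v < G.length) :
    pvAdj (pvGC G) u v = pvEdge G u v := by
  have h1 : (pvGC G).getD u [] =
      (List.range G.length).map
        (fun j => if u ≠ j then ((G.getD u []).getD j 0) == 0 else false) := by
    simp [pvGC, List.getD_eq_getElem?_getD, hu]
  simp only [pvAdj, h1]
  simp [List.getD_eq_getElem?_getD, hv, pvEdge]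
  by_cases h : u = v
  · simp [h]
  · simp [h, bne_iff_ne]

theorem pv_biapertite_eq (G : List (List Int)) :
    Biapertite G =
      ((List.range G.length).foldl (pvOptSeed G)
        (some (List.replicate G.length (-1 : Int)))).isSome := by
  unfold Biapertite isPossibleToClique pvOptSeed pvFuelA
  simp only [pv_length_pvGC]

-- ---- unconditional fold facts ----

theorem pv_fl_len (G : List (List Int)) (u : Nat) (l : List Nat) (st : List Int × List Nat) :
    (l.foldl (pvBStep G u) st).1.length = st.1.length := by
  induction l generalizing st with
  | nil => rfl
  | cons v vs ih =>
    rw [List.foldl_cons, ih]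
    unfold pvBStep
    split <;> simp

theorem pv_fl_mono (G : List (List Int)) (u : Nat) (l : List Nat) (st : List Int × List Nat)
    (w : Nat) (hw : st.1.getD w 0 ≠ -1) :
    (l.foldl (pvBStep G u) st).1.getD w 0 = st.1.getD w 0 := by
  induction l generalizing st with
  | nil => rfl
  | cons v vs ih =>
    rw [List.foldl_cons]
    by_cases hb : (pvEdge G u v && (st.1.getD v 0 == -1)) = true
    · have hb' := hb
      simp only [Bool.and_eq_true, beq_iff_eq] at hb'
      have hvw : w ≠ v := by intro e; subst e; exact hw hb'.2
      have hstep : pvBStep G u st v = (st.1.set v (1 - st.1.getD u 0), st.2 ++ [v]) := by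
        simp only [pvBStep]; rw [hb]; simp
      rw [hstep]
      have e : (st.1.set v (1 - st.1.getD u 0)).getD w 0 = st.1.getD w 0 :=
        pv_getD_set_ne _ _ _ _ hvw
      have hw2 : ((st.1.set v (1 - st.1.getD u 0), st.2 ++ [v]) :
          List Int × List Nat).1.getD w 0 ≠ -1 := by
        show (st.1.set v (1 - st.1.getD u 0)).getD w 0 ≠ -1
        rw [e]; exact hw
      exact (ih (st.1.set v (1 - st.1.getD u 0), st.2 ++ [v]) hw2).trans e
    · have hstep : pvBStep G u st v = st := by
        simp only [pvBStep]
        rw [Bool.not_eq_true] at hb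
        rw [hb]; simp
      rw [hstep]; exact ih _ hw

theorem pv_af_mono (G : List (List Int)) (V : Nat) (fuel : Nat) (c : List Int) (q : List Nat)
    (w : Nat) (hw : c.getD w 0 ≠ -1) :
    (pvAFLoop G V fuel c q).getD w 0 = c.getD w 0 := by
  induction fuel generalizing c q with
  | zero => rfl
  | succ fuel ih =>
    cases q with
    | nil => rfl
    | cons u qs =>
      unfold pvAFLoop
      have h1 := pv_fl_mono G u (List.range V) (c, []) w hw
      rw [ih _ _ (by rw [h1]; exact hw), h1]

theorem pv_af_len (G : List (List Int)) (V : Nat) (fuel : Nat) (c : List Int) (q : List Nat) :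
    (pvAFLoop G V fuel c q).length = c.length := by
  induction fuel generalizing c q with
  | zero => rfl
  | succ fuel ih =>
    cases q with
    | nil => rfl
    | cons u qs => rw [pvAFLoop, ih, pv_fl_len]

-- ---- step facts ----

theorem pv_step_facts (G : List (List Int)) (u v : Nat) (c : List Int) (n : List Nat)
    (hv : v < c.length) (hu : c.getD u 0 ≠ -1) (hInR : PVInR c) :
    (pvBStep G u (c, n) v = (c, n) ∧ (pvEdge G u v = true → c.getD v 0 ≠ -1)) ∨
    (∃ x, (x = 0 ∨ x = 1) ∧ pvEdge G u v = true ∧ c.getD v 0 = -1 ∧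
      pvBStep G u (c, n) v = (c.set v x, n ++ [v])) := by
  by_cases hb : (pvEdge G u v && (c.getD v 0 == -1)) = true
  · right
    have h := hb
    simp only [Bool.and_eq_true, beq_iff_eq] at h
    refine ⟨1 - c.getD u 0, ?_, h.1, h.2, by simp only [pvBStep]; rw [hb]; simp⟩
    rcases hInR u with h' | h' | h' <;> first | exact absurd h' hu | (rw [h']; norm_num)
  · left
    constructor
    · simp only [pvBStep]
      rw [Bool.not_eq_true] at hb
      rw [hb]; simp
    · intro he
      have hb' := hb
      simp only [Bool.and_eq_true, beq_iff_eq, not_and] at hb'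
      exact hb' he

theorem pv_fl_run (G : List (List Int)) (u : Nat) (l : List Nat) :
    ∀ (c : List Int) (n : List Nat),
      (∀ v ∈ l, v < c.length) → c.getD u 0 ≠ -1 → PVInR c →
      ∃ c' p, l.foldl (pvBStep G u) (c, n) = (c', n ++ p) ∧
        c'.length = c.length ∧ PVInR c' ∧
        (∀ w, c.getD w 0 ≠ -1 → c'.getD w 0 = c.getD w 0) ∧
        (∀ x ∈ p, x ∈ l ∧ c'.getD x 0 ≠ -1) ∧
        (∀ x, c'.getD x 0 ≠ -1 → c.getD x 0 ≠ -1 ∨ x ∈ p) ∧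
        pvUnc c' + p.length = pvUnc c := by
  induction l with
  | nil =>
    intro c n _ _ hInR
    exact ⟨c, [], by simp, rfl, hInR, fun _ h => rfl, by simp, fun x hx => Or.inl hx, by simp [pvUnc]⟩
  | cons v vs ih =>
    intro c n hl hu hInR
    have hv : v < c.length := hl v (by simp)
    rcases pv_step_facts G u v c n hv hu hInR with ⟨hid, _⟩ | ⟨x, hx01, hE, hvm1, hset⟩
    · rw [List.foldl_cons, hid]
      obtain ⟨c', p, h1, h2, h3, h4, h5, h6, h7⟩ :=
        ih c n (fun w hw => hl w (by simp [hw])) hu hInR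
      exact ⟨c', p, h1, h2, h3, h4,
        fun x hx => ⟨List.mem_cons_of_mem _ (h5 x hx).1, (h5 x hx).2⟩, h6, h7⟩
    · have hx : x ≠ -1 := by rcases hx01 with h | h <;> simp [h]
      have hvu : v ≠ u := fun e => hu (e ▸ hvm1)
      have hlen1 : (c.set v x).length = c.length := by simp
      have hInR1 : PVInR (c.set v x) := by
        intro w
        by_cases hw : w = v
        · subst hw; rw [pv_getD_set_self c w x hv]; rcases hx01 with h | h <;> simp [h]
        · rw [pv_getD_set_ne c v w x hw]; exact hInR w
      have hu1 : (c.set v x).getD u 0 ≠ -1 := by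
        rw [pv_getD_set_ne c v u x (Ne.symm hvu)]; exact hu
      rw [List.foldl_cons, hset]
      obtain ⟨c', p, h1, h2, h3, h4, h5, h6, h7⟩ :=
        ih (c.set v x) (n ++ [v]) (fun w hw => hlen1 ▸ hl w (by simp [hw])) hu1 hInR1
      refine ⟨c', v :: p, ?_, by rw [h2, hlen1], h3, ?_, ?_, ?_, ?_⟩
      · rw [h1]; simp
      · intro w hw
        have hwv : w ≠ v := fun e => hw (e ▸ hvm1)
        rw [h4 w (by rw [pv_getD_set_ne c v w x hwv]; exact hw), pv_getD_set_ne c v w x hwv]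
      · intro y hy
        rcases List.mem_cons.mp hy with he | hy'
        · subst he
          exact ⟨by simp, by rw [h4 y (by rw [pv_getD_set_self c y x hv]; exact hx),
            pv_getD_set_self c y x hv]; exact hx⟩
        · exact ⟨List.mem_cons_of_mem _ (h5 y hy').1, (h5 y hy').2⟩
      · intro y hy
        rcases h6 y hy with h | h
        · by_cases hyv : y = v
          · subst hyv; simp
          · left; rw [pv_getD_set_ne c v y x hyv] at h; exact h
        · right; simp [h]
      · have := pv_count_set c v x hv hvm1 hx
        simp only [pvUnc] at *
        simp only [List.length_cons]
        omega

-- ---- option fold (A's step) vs plain fold ----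

theorem pv_astep_none (g : List (List Bool)) (u : Nat) (l : List Nat) :
    l.foldl (pvAStep g u) none = none := by
  induction l with
  | nil => rfl
  | cons v vs ih => simpa [pvAStep] using ih

theorem pv_x01 (c : List Int) (u : Nat) (hu : c.getD u 0 ≠ -1) (hInR : PVInR c) :
    1 - c.getD u 0 = 0 ∨ 1 - c.getD u 0 = 1 := by
  rcases hInR u with h | h | h
  · exact absurd h hu
  · rw [h]; norm_num
  · rw [h]; norm_num

theorem pv_x_ne (c : List Int) (u : Nat) (hu : c.getD u 0 ≠ -1) (hInR : PVInR c) :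
    1 - c.getD u 0 ≠ c.getD u 0 := by
  rcases hInR u with h | h | h
  · exact absurd h hu
  · rw [h]; norm_num
  · rw [h]; norm_num

theorem pv_set_InR (c : List Int) (v : Nat) (x : Int) (hv : v < c.length)
    (hx : x = 0 ∨ x = 1) (hInR : PVInR c) : PVInR (c.set v x) := by
  intro w
  by_cases hw : w = v
  · subst hw; rw [pv_getD_set_self c w x hv]; rcases hx with h | h <;> simp [h]
  · rw [pv_getD_set_ne c v w x hw]; exact hInR w

theorem pv_astep_cases (G : List (List Int)) (u v : Nat) (c : List Int) (n : List Nat)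
    (hu' : u < G.length) (hv' : v < G.length) :
    (pvEdge G u v = true ∧ c.getD v 0 = -1 ∧
      pvAStep (pvGC G) u (some (c, n)) v = some (c.set v (1 - c.getD u 0), n ++ [v]) ∧
      pvBStep G u (c, n) v = (c.set v (1 - c.getD u 0), n ++ [v])) ∨
    (pvEdge G u v = true ∧ c.getD v 0 ≠ -1 ∧ c.getD v 0 = c.getD u 0 ∧
      pvAStep (pvGC G) u (some (c, n)) v = none ∧
      pvBStep G u (c, n) v = (c, n)) ∨
    ((pvEdge G u v = true → c.getD v 0 ≠ -1 ∧ c.getD v 0 ≠ c.getD u 0) ∧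
      pvAStep (pvGC G) u (some (c, n)) v = some (c, n) ∧
      pvBStep G u (c, n) v = (c, n)) := by
  have hA : pvAdj (pvGC G) u v = pvEdge G u v := pv_adj_eq G u v hu' hv'
  by_cases hb1 : (pvEdge G u v && (c.getD v 0 == -1)) = true
  · left
    have h := hb1
    simp only [Bool.and_eq_true, beq_iff_eq] at h
    refine ⟨h.1, h.2, ?_, ?_⟩
    · simp only [pvAStep, hA]; rw [hb1]; simp
    · simp only [pvBStep]; rw [hb1]; simp
  · have hBid : pvBStep G u (c, n) v = (c, n) := by
      simp only [pvBStep]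
      rw [Bool.not_eq_true] at hb1
      rw [hb1]; simp
    by_cases hb2 : (pvEdge G u v && (c.getD v 0 == c.getD u 0)) = true
    · right; left
      have h := hb2
      simp only [Bool.and_eq_true, beq_iff_eq] at h
      have h1 := hb1
      simp only [Bool.and_eq_true, beq_iff_eq, not_and] at h1
      refine ⟨h.1, h1 h.1, h.2, ?_, hBid⟩
      simp only [pvAStep, hA]
      rw [Bool.not_eq_true] at hb1
      rw [hb1, hb2]; simp
    · right; right
      have h1 := hb1
      simp only [Bool.and_eq_true, beq_iff_eq, not_and] at h1
      have h2 := hb2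
      simp only [Bool.and_eq_true, beq_iff_eq, not_and] at h2
      refine ⟨fun hE => ⟨h1 hE, h2 hE⟩, ?_, hBid⟩
      simp only [pvAStep, hA]
      rw [Bool.not_eq_true] at hb1 hb2
      rw [hb1, hb2]; simp

theorem pv_fl_mono' (G : List (List Int)) (u : Nat) (l : List Nat) (c : List Int)
    (n : List Nat) (w : Nat) (hw : c.getD w 0 ≠ -1) :
    (l.foldl (pvBStep G u) (c, n)).1.getD w 0 = c.getD w 0 :=
  pv_fl_mono G u l (c, n) w hw

theorem pv_fla_some (G : List (List Int)) (u : Nat) (l : List Nat) :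
    ∀ (c : List Int) (n : List Nat) (st' : List Int × List Nat),
      (∀ v ∈ l, v < c.length ∧ v < G.length) → u < G.length →
      c.getD u 0 ≠ -1 → PVInR c →
      l.foldl (pvAStep (pvGC G) u) (some (c, n)) = some st' →
      l.foldl (pvBStep G u) (c, n) = st' ∧
      (∀ v ∈ l, pvEdge G u v = true →
        st'.1.getD v 0 ≠ -1 ∧ st'.1.getD v 0 ≠ st'.1.getD u 0) := by
  induction l with
  | nil =>
    intro c n st' _ _ _ _ h
    simp only [List.foldl_nil, Option.some.injEq] at h
    subst h
    exact ⟨rfl, by simp⟩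
  | cons v vs ih =>
    intro c n st' hl hu' hu hInR h
    obtain ⟨hvc, hvG⟩ := hl v (by simp)
    rcases pv_astep_cases G u v c n hu' hvG with
      ⟨hE, hm1, hA, hB⟩ | ⟨hE, hne, heq, hA, _⟩ | ⟨himp, hA, hB⟩
    · rw [List.foldl_cons, hA] at h
      rw [List.foldl_cons, hB]
      have hx01 := pv_x01 c u hu hInR
      have hx : 1 - c.getD u 0 ≠ -1 := by rcases hx01 with h' | h' <;> omega
      have hvu : v ≠ u := fun e => hu (e ▸ hm1)
      have hcu1 : (c.set v (1 - c.getD u 0)).getD u 0 = c.getD u 0 :=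
        pv_getD_set_ne c v u _ (Ne.symm hvu)
      have hu1 : (c.set v (1 - c.getD u 0)).getD u 0 ≠ -1 := by rw [hcu1]; exact hu
      have hInR1 := pv_set_InR c v _ hvc hx01 hInR
      have hl1 : ∀ w ∈ vs, w < (c.set v (1 - c.getD u 0)).length ∧ w < G.length := by
        intro w hw; rw [List.length_set]; exact hl w (by simp [hw])
      obtain ⟨hfold, hclo⟩ := ih (c.set v (1 - c.getD u 0)) (n ++ [v]) st' hl1 hu' hu1 hInR1 h
      refine ⟨hfold, ?_⟩
      intro w hw hEw
      rcases List.mem_cons.mp hw with he | hw'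
      · subst he
        have hcv1 : (c.set w (1 - c.getD u 0)).getD w 0 = 1 - c.getD u 0 :=
          pv_getD_set_self c w _ hvc
        have hmv := pv_fl_mono' G u vs (c.set w (1 - c.getD u 0)) (n ++ [w]) w
          (by rw [hcv1]; exact hx)
        have hmu := pv_fl_mono' G u vs (c.set w (1 - c.getD u 0)) (n ++ [w]) u hu1
        rw [hfold] at hmv hmu
        rw [hmv, hmu, hcv1, hcu1]
        exact ⟨hx, pv_x_ne c u hu hInR⟩
      · exact hclo w hw' hEw
    · rw [List.foldl_cons, hA, pv_astep_none] at h
      exact absurd h (by simp)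
    · rw [List.foldl_cons, hA] at h
      rw [List.foldl_cons, hB]
      have hl1 : ∀ w ∈ vs, w < c.length ∧ w < G.length := fun w hw => hl w (by simp [hw])
      obtain ⟨hfold, hclo⟩ := ih c n st' hl1 hu' hu hInR h
      refine ⟨hfold, ?_⟩
      intro w hw hEw
      rcases List.mem_cons.mp hw with he | hw'
      · subst he
        obtain ⟨h1, h2⟩ := himp hEw
        have hmv := pv_fl_mono' G u vs c n w h1
        have hmu := pv_fl_mono' G u vs c n u hu
        rw [hfold] at hmv hmu
        rw [hmv, hmu]
        exact ⟨h1, h2⟩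
      · exact hclo w hw' hEw

theorem pv_fla_none (G : List (List Int)) (u : Nat) (l : List Nat) :
    ∀ (c : List Int) (n : List Nat),
      (∀ v ∈ l, v < c.length ∧ v < G.length) → u < G.length →
      c.getD u 0 ≠ -1 → PVInR c →
      l.foldl (pvAStep (pvGC G) u) (some (c, n)) = none →
      ∃ v ∈ l, pvEdge G u v = true ∧
        (l.foldl (pvBStep G u) (c, n)).1.getD v 0 ≠ -1 ∧
        (l.foldl (pvBStep G u) (c, n)).1.getD v 0 =
          (l.foldl (pvBStep G u) (c, n)).1.getD u 0 := by
  induction l with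
  | nil => intro c n _ _ _ _ h; simp at h
  | cons v vs ih =>
    intro c n hl hu' hu hInR h
    obtain ⟨hvc, hvG⟩ := hl v (by simp)
    rcases pv_astep_cases G u v c n hu' hvG with
      ⟨hE, hm1, hA, hB⟩ | ⟨hE, hne, heq, hA, hB⟩ | ⟨himp, hA, hB⟩
    · rw [List.foldl_cons, hA] at h
      rw [List.foldl_cons, hB]
      have hx01 := pv_x01 c u hu hInR
      have hvu : v ≠ u := fun e => hu (e ▸ hm1)
      have hu1 : (c.set v (1 - c.getD u 0)).getD u 0 ≠ -1 := by
        rw [pv_getD_set_ne c v u _ (Ne.symm hvu)]; exact hu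
      have hInR1 := pv_set_InR c v _ hvc hx01 hInR
      have hl1 : ∀ w ∈ vs, w < (c.set v (1 - c.getD u 0)).length ∧ w < G.length := by
        intro w hw; rw [List.length_set]; exact hl w (by simp [hw])
      obtain ⟨w, hwmem, hEw, hw1, hw2⟩ := ih (c.set v (1 - c.getD u 0)) (n ++ [v]) hl1 hu' hu1 hInR1 h
      exact ⟨w, List.mem_cons_of_mem _ hwmem, hEw, hw1, hw2⟩
    · have hid : List.foldl (pvBStep G u) (c, n) (v :: vs) =
          List.foldl (pvBStep G u) (c, n) vs := by rw [List.foldl_cons, hB]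
      have hmv := pv_fl_mono' G u vs c n v hne
      have hmu := pv_fl_mono' G u vs c n u hu
      refine ⟨v, by simp, hE, ?_, ?_⟩
      · rw [hid, hmv]; exact hne
      · rw [hid, hmv, hmu, heq]
    · rw [List.foldl_cons, hA] at h
      rw [List.foldl_cons, hB]
      obtain ⟨w, hwmem, hEw, hw1, hw2⟩ := ih c n (fun w hw => hl w (by simp [hw])) hu' hu hInR h
      exact ⟨w, List.mem_cons_of_mem _ hwmem, hEw, hw1, hw2⟩

-- ---- the BFS loop: A's loop agrees with the full run and detects exactly the clashes ----

theorem pv_a_run (G : List (List Int)) :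
    ∀ (fuel : Nat) (c : List Int) (q : List Nat),
      PVInv G c q → pvMeasure G c q < fuel →
      ((pvALoop (pvGC G) G.length fuel c q).1 = true ∧
        (pvALoop (pvGC G) G.length fuel c q).2 = pvAFLoop G G.length fuel c q ∧
        PVInv G (pvAFLoop G G.length fuel c q) []) ∨
      ((pvALoop (pvGC G) G.length fuel c q).1 = false ∧
        PVClash G (pvAFLoop G G.length fuel c q)) := by
  intro fuel
  induction fuel with
  | zero => intro c q _ hm; exact absurd hm (Nat.not_lt_zero _)
  | succ fuel ih =>
    intro c q hInv hm
    obtain ⟨⟨hlen, hInR, hQok⟩, hClosed⟩ := hInv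
    cases q with
    | nil =>
      have e1 : pvALoop (pvGC G) G.length (fuel+1) c [] = (true, c) := by rw [pvALoop]
      have e2 : pvAFLoop G G.length (fuel+1) c [] = c := by rw [pvAFLoop]
      rw [e1, e2]
      exact Or.inl ⟨rfl, rfl, ⟨⟨hlen, hInR, hQok⟩, hClosed⟩⟩
    | cons u qs =>
      obtain ⟨huV, hcu⟩ := hQok u (by simp)
      have hl : ∀ v ∈ List.range G.length, v < c.length ∧ v < G.length := by
        intro v hv; rw [hlen]; exact ⟨List.mem_range.mp hv, List.mem_range.mp hv⟩
      obtain ⟨c', p, hBeq, hlen', hInR', hmono, hpmem, hnew, hunc⟩ :=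
        pv_fl_run G u (List.range G.length) c [] (fun v hv => (hl v hv).1) hcu hInR
      simp only [List.nil_append] at hBeq
      have hAFeq : pvAFLoop G G.length (fuel+1) c (u :: qs) =
          pvAFLoop G G.length fuel c' (qs ++ p) := by
        rw [pvAFLoop, hBeq]
      rcases hfold : (List.range G.length).foldl (pvAStep (pvGC G) u) (some (c, [])) with _ | st'
      · right
        obtain ⟨v, hvmem, hE, hcv, hceq⟩ :=
          pv_fla_none G u (List.range G.length) c [] hl huV hcu hInR hfold
        rw [hBeq] at hcv hceq
        have hvV : v < G.length := List.mem_range.mp hvmem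
        have hcu' : c'.getD u 0 ≠ -1 := by rw [hmono u hcu]; exact hcu
        have e1 : pvALoop (pvGC G) G.length (fuel+1) c (u :: qs) = (false, c) := by
          rw [pvALoop, hfold]
        constructor
        · rw [e1]
        · rw [hAFeq]
          refine ⟨u, v, huV, hvV, hE, ?_, ?_⟩
          · rw [pv_af_mono G G.length fuel c' (qs ++ p) u hcu']; exact hcu'
          · rw [pv_af_mono G G.length fuel c' (qs ++ p) u hcu',
               pv_af_mono G G.length fuel c' (qs ++ p) v hcv]
            exact hceq.symm
      · obtain ⟨hBfold, hclosure⟩ :=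
          pv_fla_some G u (List.range G.length) c [] st' hl huV hcu hInR hfold
        have hst' : st' = (c', p) := by rw [← hBfold, hBeq]
        subst hst'
        have hQok' : PVQok G c' (qs ++ p) := by
          intro w hw
          rcases List.mem_append.mp hw with h | h
          · obtain ⟨h1, h2⟩ := hQok w (by simp [h])
            exact ⟨h1, by rw [hmono w h2]; exact h2⟩
          · obtain ⟨h1, h2⟩ := hpmem w h
            exact ⟨List.mem_range.mp h1, h2⟩
        have hClosed' : PVClosed G c' (qs ++ p) := by
          intro w hwV hwc hwnot v' hv'V hE'
          by_cases hwu : w = u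
          · subst hwu
            exact hclosure v' (List.mem_range.mpr hv'V) hE'
          · have hwq : w ∉ qs := fun hh => hwnot (List.mem_append.mpr (Or.inl hh))
            have hwp : w ∉ p := fun hh => hwnot (List.mem_append.mpr (Or.inr hh))
            have hwc0 : c.getD w 0 ≠ -1 := by
              rcases hnew w hwc with h | h
              · exact h
              · exact absurd h hwp
            have hold := hClosed w hwV hwc0 (by simp [hwu, hwq]) v' hv'V hE'
            rw [hmono v' hold.1, hmono w hwc0]
            exact hold
        have hineq : (G.length+1) * pvUnc c' + p.length ≤ (G.length+1) * pvUnc c := by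
          calc (G.length+1) * pvUnc c' + p.length
              ≤ (G.length+1) * pvUnc c' + (G.length+1) * p.length := by
                exact Nat.add_le_add_left (Nat.le_mul_of_pos_left p.length (by omega)) _
            _ = (G.length+1) * (pvUnc c' + p.length) := by ring
            _ = (G.length+1) * pvUnc c := by rw [hunc]
        have hm' : pvMeasure G c' (qs ++ p) < fuel := by
          simp only [pvMeasure, List.length_append, List.length_cons] at hm ⊢
          omega
        have hrec := ih c' (qs ++ p) ⟨⟨hlen'.trans hlen, hInR', hQok'⟩, hClosed'⟩ hm'
        have hALeq : pvALoop (pvGC G) G.length (fuel+1) c (u :: qs) =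
            pvALoop (pvGC G) G.length fuel c' (qs ++ p) := by
          rw [pvALoop, hfold]
        rw [hALeq, hAFeq]
        exact hrec

theorem pv_optseed_none (G : List (List Int)) (l : List Nat) :
    l.foldl (pvOptSeed G) none = none := by
  induction l with
  | nil => rfl
  | cons u us ih => simpa [pvOptSeed] using ih

theorem pv_om_full (G : List (List Int)) (l : List Nat) :
    ∀ (c : List Int) (w : Nat), c.getD w 0 ≠ -1 →
      (l.foldl (pvFullSeed G) c).getD w 0 = c.getD w 0 := by
  induction l with
  | nil => intro c w hw; rfl
  | cons u us ih =>
    intro c w hw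
    rw [List.foldl_cons]
    by_cases hb : (c.getD u 0 == -1) = true
    · have h : c.getD u 0 = -1 := by simpa using hb
      have huw : w ≠ u := by intro e; subst e; exact hw h
      have hstep : pvFullSeed G c u = pvAFLoop G G.length (pvFuelA G) (c.set u 1) [u] := by
        simp only [pvFullSeed]; rw [hb]; simp
      rw [hstep]
      have h1 : (c.set u 1).getD w 0 = c.getD w 0 := pv_getD_set_ne _ _ _ _ huw
      have h2 := pv_af_mono G G.length (pvFuelA G) (c.set u 1) [u] w (by rw [h1]; exact hw)
      rw [ih _ _ (by rw [h2, h1]; exact hw), h2, h1]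
    · have hstep : pvFullSeed G c u = c := by
        simp only [pvFullSeed]
        rw [Bool.not_eq_true] at hb
        rw [hb]; simp
      rw [hstep]; exact ih _ _ hw

-- ---- outer loop ----

theorem pv_fullseed_len (G : List (List Int)) (c : List Int) (u : Nat) :
    (pvFullSeed G c u).length = c.length := by
  simp only [pvFullSeed]
  split
  · rw [pv_af_len, List.length_set]
  · rfl

theorem pv_fullseed_step (G : List (List Int)) (c : List Int) (u : Nat)
    (hcu : (c.getD u 0 == -1) = true) :
    pvFullSeed G c u = pvAFLoop G G.length (pvFuelA G) (c.set u 1) [u] := by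
  simp only [pvFullSeed]; rw [hcu]; simp

theorem pv_fullseed_id (G : List (List Int)) (c : List Int) (u : Nat)
    (hcu : ¬(c.getD u 0 == -1) = true) :
    pvFullSeed G c u = c := by
  simp only [pvFullSeed]
  rw [Bool.not_eq_true] at hcu
  rw [hcu]; simp

theorem pv_seed_inv (G : List (List Int)) (c : List Int) (u : Nat)
    (huV : u < G.length) (hcueq : c.getD u 0 = -1)
    (hlen : c.length = G.length) (hInR : PVInR c) (hClosed : PVClosed G c []) :
    PVInv G (c.set u 1) [u] := by
  have hulen : u < c.length := by rw [hlen]; exact huV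
  have hcu2 : (c.set u 1).getD u 0 = 1 := pv_getD_set_self c u 1 hulen
  refine ⟨⟨by rw [List.length_set]; exact hlen, pv_set_InR c u 1 hulen (Or.inr rfl) hInR, ?_⟩, ?_⟩
  · intro w hw
    have hwu : w = u := by simpa using hw
    subst hwu
    exact ⟨huV, by rw [hcu2]; norm_num⟩
  · intro w hwV hwc hwnot v hvV hE
    have hwu : w ≠ u := by simpa using hwnot
    have hwc0 : c.getD w 0 ≠ -1 := by rwa [pv_getD_set_ne c u w 1 hwu] at hwc
    have hold := hClosed w hwV hwc0 (by simp) v hvV hE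
    by_cases hvu : v = u
    · subst hvu; exact absurd hcueq hold.1
    · rw [pv_getD_set_ne c u v 1 hvu, pv_getD_set_ne c u w 1 hwu]
      exact hold

theorem pv_seed_meas (G : List (List Int)) (c : List Int) (u : Nat)
    (hlen : c.length = G.length) :
    pvMeasure G (c.set u 1) [u] < pvFuelA G := by
  have h1 : pvUnc (c.set u 1) ≤ G.length := by
    have h := pv_unc_le (c.set u 1)
    rwa [List.length_set, hlen] at h
  have h2 : (G.length+1) * pvUnc (c.set u 1) ≤ (G.length+1) * G.length :=
    Nat.mul_le_mul_left _ h1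
  have h3 : (G.length+1) * G.length < (G.length+1) * (G.length+1) := by nlinarith
  simp only [pvMeasure, pvFuelA, List.length_cons, List.length_nil]
  omega

theorem pv_outer_run (G : List (List Int)) (l : List Nat) :
    ∀ (c : List Int), (∀ u ∈ l, u < G.length) → PVInv G c [] →
      ((l.foldl (pvOptSeed G) (some c) = some (l.foldl (pvFullSeed G) c)) ∧
        PVInv G (l.foldl (pvFullSeed G) c) []) ∨
      ((l.foldl (pvOptSeed G) (some c) = none) ∧
        PVClash G (l.foldl (pvFullSeed G) c)) := by
  induction l with
  | nil => intro c _ hInv; exact Or.inl ⟨rfl, hInv⟩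
  | cons u us ih =>
    intro c hl hInv
    obtain ⟨⟨hlen, hInR, hQok⟩, hClosed⟩ := hInv
    have huV : u < G.length := hl u (by simp)
    by_cases hcu : (c.getD u 0 == -1) = true
    · have hcueq : c.getD u 0 = -1 := by simpa using hcu
      have hInv2 := pv_seed_inv G c u huV hcueq hlen hInR hClosed
      have hmeas := pv_seed_meas G c u hlen
      rcases pv_a_run G (pvFuelA G) (c.set u 1) [u] hInv2 hmeas with
        ⟨hok, heq2, hInvF⟩ | ⟨hbad, hclash⟩
      · have hr : pvALoop (pvGC G) G.length (pvFuelA G) (c.set u 1) [u] =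
            (true, pvAFLoop G G.length (pvFuelA G) (c.set u 1) [u]) := by
          rcases hres : pvALoop (pvGC G) G.length (pvFuelA G) (c.set u 1) [u] with ⟨b, cc⟩
          rw [hres] at hok heq2
          simp only at hok heq2
          rw [hok, heq2]
        have hstep : pvOptSeed G (some c) u =
            some (pvAFLoop G G.length (pvFuelA G) (c.set u 1) [u]) := by
          simp only [pvOptSeed]
          rw [hcu, hr]
          simp
        have hstepF := pv_fullseed_step G c u hcu
        rw [List.foldl_cons, List.foldl_cons, hstep, hstepF]
        exact ih _ (fun w hw => hl w (by simp [hw])) hInvF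
      · have hr : pvALoop (pvGC G) G.length (pvFuelA G) (c.set u 1) [u] =
            (false, (pvALoop (pvGC G) G.length (pvFuelA G) (c.set u 1) [u]).2) := by
          rcases hres : pvALoop (pvGC G) G.length (pvFuelA G) (c.set u 1) [u] with ⟨b, cc⟩
          rw [hres] at hbad
          simp only at hbad
          rw [hbad]
        have hstep : pvOptSeed G (some c) u = none := by
          simp only [pvOptSeed]
          rw [hcu, hr]
          simp
        have hstepF := pv_fullseed_step G c u hcu
        rw [List.foldl_cons, List.foldl_cons, hstep, hstepF, pv_optseed_none]
        refine Or.inr ⟨rfl, ?_⟩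
        obtain ⟨a, b, haV, hbV, hE, h1, h2⟩ := hclash
        have h1b : (pvAFLoop G G.length (pvFuelA G) (c.set u 1) [u]).getD b 0 ≠ -1 := by
          rw [← h2]; exact h1
        refine ⟨a, b, haV, hbV, hE, ?_, ?_⟩
        · rw [pv_om_full G us _ a h1]; exact h1
        · rw [pv_om_full G us _ a h1, pv_om_full G us _ b h1b]; exact h2
    · have hstep : pvOptSeed G (some c) u = some c := by
        simp only [pvOptSeed]
        rw [Bool.not_eq_true] at hcu
        rw [hcu]
        simp
      rw [List.foldl_cons, List.foldl_cons, hstep, pv_fullseed_id G c u hcu]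
      exact ih c (fun w hw => hl w (by simp [hw])) ⟨⟨hlen, hInR, hQok⟩, hClosed⟩

theorem pv_ac_all (G : List (List Int)) (l : List Nat) :
    ∀ (c : List Int), c.length = G.length → (∀ u ∈ l, u < G.length) →
      ∀ v ∈ l, (l.foldl (pvFullSeed G) c).getD v 0 ≠ -1 := by
  induction l with
  | nil => intro _ _ _ v hv; simp at hv
  | cons u us ih =>
    intro c hlen hl v hv
    have huV : u < G.length := hl u (by simp)
    have hcol : (pvFullSeed G c u).getD u 0 ≠ -1 := by
      by_cases hcu : (c.getD u 0 == -1) = true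
      · rw [pv_fullseed_step G c u hcu]
        have hulen : u < c.length := by rw [hlen]; exact huV
        have h1 : (c.set u 1).getD u 0 = 1 := pv_getD_set_self c u 1 hulen
        rw [pv_af_mono G G.length (pvFuelA G) (c.set u 1) [u] u (by rw [h1]; norm_num), h1]
        norm_num
      · rw [pv_fullseed_id G c u hcu]
        rw [Bool.not_eq_true] at hcu
        simpa using hcu
    rcases List.mem_cons.mp hv with he | hv'
    · subst he
      rw [List.foldl_cons]
      rw [pv_om_full G us _ v hcol]
      exact hcol
    · rw [List.foldl_cons]
      exact ih (pvFullSeed G c u) (by rw [pv_fullseed_len]; exact hlen)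
        (fun w hw => hl w (by simp [hw])) v hv'

theorem pv_replicate_InR (n : Nat) : PVInR (List.replicate n (-1 : Int)) := by
  intro v
  rcases pv_getD_replicate n v with h | h
  · exact Or.inl h
  · exact Or.inr (Or.inl h)

theorem pv_replicate_closed (G : List (List Int)) :
    PVClosed G (List.replicate G.length (-1 : Int)) [] := by
  intro u huV hcu _
  exfalso
  apply hcu
  rw [List.getD_eq_getElem?_getD]
  simp [huV]

-- ---- A = true → a proper 2-coloring exists ----

theorem pv_bool_of_ne (a b : Int) (ha : a = 0 ∨ a = 1) (hb : b = 0 ∨ b = 1)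
    (hne : a ≠ b) : (a == 1) ≠ (b == 1) := by
  rcases ha with h | h <;> rcases hb with h' | h' <;> simp [h, h'] at hne ⊢

theorem pv_true_P (G : List (List Int)) (h : Biapertite G = true) : PVP G := by
  rw [pv_biapertite_eq] at h
  have hInv0 : PVInv G (List.replicate G.length (-1 : Int)) [] :=
    ⟨⟨by simp, pv_replicate_InR G.length, fun u hu => absurd hu (List.not_mem_nil)⟩,
      pv_replicate_closed G⟩
  rcases pv_outer_run G (List.range G.length) (List.replicate G.length (-1))
      (fun u hu => List.mem_range.mp hu) hInv0 with ⟨heq, hInvF⟩ | ⟨heq, _⟩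
  · refine ⟨fun v => (pvAFC G).getD v 0 == 1, ?_⟩
    intro u v huV hvV hE
    obtain ⟨⟨_, hInR, _⟩, hClosed⟩ := hInvF
    have hcu : (pvAFC G).getD u 0 ≠ -1 :=
      pv_ac_all G (List.range G.length) (List.replicate G.length (-1)) (by simp)
        (fun w hw => List.mem_range.mp hw) u (List.mem_range.mpr huV)
    have hcl := hClosed u huV hcu (List.not_mem_nil) v hvV hE
    have hInRu : (pvAFC G).getD u 0 = 0 ∨ (pvAFC G).getD u 0 = 1 := by
      rcases hInR u with h' | h' | h'
      · exact absurd h' hcu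
      · exact Or.inl h'
      · exact Or.inr h'
    have hInRv : (pvAFC G).getD v 0 = 0 ∨ (pvAFC G).getD v 0 = 1 := by
      rcases hInR v with h' | h' | h'
      · exact absurd h' hcl.1
      · exact Or.inl h'
      · exact Or.inr h'
    exact pv_bool_of_ne _ _ hInRu hInRv (fun e => hcl.2 e.symm)
  · rw [heq] at h
    simp at h

-- ---- symmetry and the colored/uncolored disconnection ----

theorem pv_edge_symm (G : List (List Int)) (hPre : Pre_Biapertite G)
    (a b : Nat) (ha : a < G.length) (hb : b < G.length)
    (hE : pvEdge G a b = true) : pvEdge G b a = true := by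
  simp only [pvEdge, Bool.and_eq_true, bne_iff_ne, beq_iff_eq] at hE ⊢
  exact ⟨Ne.symm hE.1, (hPre.2 a ha b hb hE.1).mp hE.2⟩

theorem pv_disconnect (G : List (List Int)) (hPre : Pre_Biapertite G)
    (c : List Int) (hClosed : PVClosed G c [])
    (a b : Nat) (ha : a < G.length) (hb : b < G.length)
    (hE : pvEdge G a b = true) : (c.getD a 0 = -1 ↔ c.getD b 0 = -1) := by
  constructor
  · intro hua
    by_contra hvb
    have := hClosed b hb hvb (List.not_mem_nil) a ha (pv_edge_symm G hPre a b ha hb hE)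
    exact this.1 hua
  · intro hub
    by_contra hva
    have := hClosed a ha hva (List.not_mem_nil) b hb hE
    exact this.1 hub

-- ---- agreement is preserved by the conflict-free scan ----

theorem pv_xor_ne (x y k : Bool) (h : x ≠ y) : xor x k ≠ xor y k := by
  cases x <;> cases y <;> cases k <;> simp_all

theorem pv_fl_agrees (G : List (List Int)) (u : Nat) (l : List Nat) :
    ∀ (c : List Int) (n : List Nat) (χ : Nat → Bool),
      (∀ v ∈ l, v < c.length ∧ v < G.length) → u < G.length →
      c.getD u 0 ≠ -1 → PVInR c → PVProper G χ → PVAgrees G χ c →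
      PVAgrees G χ (l.foldl (pvBStep G u) (c, n)).1 := by
  induction l with
  | nil => intro c n χ _ _ _ _ _ hagr; exact hagr
  | cons v vs ih =>
    intro c n χ hl hu' hu hInR hχ hagr
    obtain ⟨hvc, hvG⟩ := hl v (by simp)
    rcases pv_astep_cases G u v c n hu' hvG with
      ⟨hE, hm1, _, hB⟩ | ⟨_, _, _, _, hB⟩ | ⟨_, _, hB⟩
    · rw [List.foldl_cons, hB]
      have hx01 := pv_x01 c u hu hInR
      have hvu : v ≠ u := fun e => hu (e ▸ hm1)
      have hu1 : (c.set v (1 - c.getD u 0)).getD u 0 ≠ -1 := by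
        rw [pv_getD_set_ne c v u _ (Ne.symm hvu)]; exact hu
      have hInR1 := pv_set_InR c v _ hvc hx01 hInR
      have hagr1 : PVAgrees G χ (c.set v (1 - c.getD u 0)) := by
        intro w hwV hwc
        by_cases hwv : w = v
        · subst hwv
          rw [pv_getD_set_self c w _ hvc]
          have hne := hχ u w hu' hwV hE
          have hχu := hagr u hu' hu
          have hflip : χ w = !(χ u) := by
            cases hxw : χ w <;> cases hxu : χ u <;> simp_all
          rw [hflip, hχu]
          rcases hInR u with h' | h' | h'
          · exact absurd h' hu
          · rw [h']; decide
          · rw [h']; decide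
        · rw [pv_getD_set_ne c v w _ hwv]
          exact hagr w hwV (by rwa [pv_getD_set_ne c v w _ hwv] at hwc)
      exact ih (c.set v _) (n ++ [v]) χ
        (by intro w hw; rw [List.length_set]; exact hl w (by simp [hw]))
        hu' hu1 hInR1 hχ hagr1
    · rw [List.foldl_cons, hB]
      exact ih c n χ (fun w hw => hl w (by simp [hw])) hu' hu hInR hχ hagr
    · rw [List.foldl_cons, hB]
      exact ih c n χ (fun w hw => hl w (by simp [hw])) hu' hu hInR hχ hagr

-- agreement is preserved by the whole (conflict-ignoring) BFS run
theorem pv_af_agrees (G : List (List Int)) :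
    ∀ (fuel : Nat) (c : List Int) (q : List Nat) (χ : Nat → Bool),
      c.length = G.length → PVInR c → PVQok G c q →
      PVProper G χ → PVAgrees G χ c →
      PVAgrees G χ (pvAFLoop G G.length fuel c q) := by
  intro fuel
  induction fuel with
  | zero => intro c q χ _ _ _ _ hagr; rw [pvAFLoop]; exact hagr
  | succ fuel ih =>
    intro c q χ hlen hInR hQok hχ hagr
    cases q with
    | nil => rw [pvAFLoop]; exact hagr
    | cons u qs =>
      obtain ⟨huV, hcu⟩ := hQok u (by simp)
      have hl : ∀ v ∈ List.range G.length, v < c.length ∧ v < G.length := by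
        intro v hv; rw [hlen]; exact ⟨List.mem_range.mp hv, List.mem_range.mp hv⟩
      obtain ⟨c', p, hBeq, hlen', hInR', hmono, hpmem, hnew, hunc⟩ :=
        pv_fl_run G u (List.range G.length) c [] (fun v hv => (hl v hv).1) hcu hInR
      simp only [List.nil_append] at hBeq
      have hQok' : PVQok G c' (qs ++ p) := by
        intro w hw
        rcases List.mem_append.mp hw with h | h
        · obtain ⟨h1, h2⟩ := hQok w (by simp [h])
          exact ⟨h1, by rw [hmono w h2]; exact h2⟩
        · obtain ⟨h1, h2⟩ := hpmem w h
          exact ⟨List.mem_range.mp h1, h2⟩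
      have hagr' : PVAgrees G χ c' := by
        have h := pv_fl_agrees G u (List.range G.length) c [] χ hl huV hcu hInR hχ hagr
        rw [hBeq] at h
        exact h
      rw [pvAFLoop, hBeq]
      exact ih c' (qs ++ p) χ (hlen'.trans hlen) hInR' hQok' hχ hagr'

-- the loop never answers 'false' when the colors agree with a proper coloring
theorem pv_aloop_true (G : List (List Int)) (fuel : Nat) (c : List Int) (q : List Nat)
    (χ : Nat → Bool) (hInv : PVInv G c q) (hm : pvMeasure G c q < fuel)
    (hχ : PVProper G χ) (hagr : PVAgrees G χ c) :
    (pvALoop (pvGC G) G.length fuel c q).1 = true := by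
  rcases pv_a_run G fuel c q hInv hm with ⟨h, _, _⟩ | ⟨_, hclash⟩
  · exact h
  · exfalso
    obtain ⟨a, b, haV, hbV, hE, h1, h2⟩ := hclash
    have hagr' := pv_af_agrees G fuel c q χ hInv.1.1 hInv.1.2.1 hInv.1.2.2 hχ hagr
    apply hχ a b haV hbV hE
    rw [hagr' a haV h1, hagr' b hbV (h2 ▸ h1), h2]

-- ---- the seeding flip ----

theorem pv_flip (G : List (List Int)) (hPre : Pre_Biapertite G)
    (c : List Int) (hClosed : PVClosed G c [])
    (χ : Nat → Bool) (hχ : PVProper G χ) (hagr : PVAgrees G χ c)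
    (u : Nat) (huV : u < G.length) (hcu : c.getD u 0 = -1) (hlen : c.length = G.length) :
    ∃ χ', PVProper G χ' ∧ PVAgrees G χ' (c.set u 1) := by
  refine ⟨fun v => if v < G.length ∧ c.getD v 0 = -1 then xor (χ v) (!(χ u)) else χ v,
    ?_, ?_⟩
  · intro a b haV hbV hE
    have hd := pv_disconnect G hPre c hClosed a b haV hbV hE
    show (if a < G.length ∧ c.getD a 0 = -1 then xor (χ a) (!(χ u)) else χ a) ≠
         (if b < G.length ∧ c.getD b 0 = -1 then xor (χ b) (!(χ u)) else χ b)
    by_cases hca : c.getD a 0 = -1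
    · have hcb := hd.mp hca
      rw [if_pos (And.intro haV hca), if_pos (And.intro hbV hcb)]
      exact pv_xor_ne _ _ _ (hχ a b haV hbV hE)
    · have hcb : ¬ c.getD b 0 = -1 := fun h => hca (hd.mpr h)
      rw [if_neg (fun h : _ ∧ _ => hca h.2), if_neg (fun h : _ ∧ _ => hcb h.2)]
      exact hχ a b haV hbV hE
  · intro w hwV hwc
    show (if w < G.length ∧ c.getD w 0 = -1 then xor (χ w) (!(χ u)) else χ w) =
         ((c.set u 1).getD w 0 == 1)
    by_cases hwu : w = u
    · subst hwu
      rw [pv_getD_set_self c w 1 (by rw [hlen]; exact hwV)]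
      rw [if_pos (And.intro hwV hcu)]
      cases χ w <;> rfl
    · rw [pv_getD_set_ne c u w 1 hwu]
      rw [pv_getD_set_ne c u w 1 hwu] at hwc
      rw [if_neg (fun h : _ ∧ _ => hwc h.2)]
      exact hagr w hwV hwc

-- ---- P → A = true ----

theorem pv_outer_some (G : List (List Int)) (hPre : Pre_Biapertite G) (l : List Nat) :
    ∀ (c : List Int), (∀ u ∈ l, u < G.length) → PVInv G c [] →
      (∀ χ, PVProper G χ → ∃ χ', PVProper G χ' ∧ PVAgrees G χ' c) → PVP G →
      ∃ c', l.foldl (pvOptSeed G) (some c) = some c' ∧ PVInv G c' [] ∧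
        (∀ χ, PVProper G χ → ∃ χ', PVProper G χ' ∧ PVAgrees G χ' c') := by
  induction l with
  | nil => intro c _ hInv hExt _; exact ⟨c, rfl, hInv, hExt⟩
  | cons u us ih =>
    intro c hl hInv hExt hP
    obtain ⟨⟨hlen, hInR, hQok⟩, hClosed⟩ := hInv
    have huV : u < G.length := hl u (by simp)
    by_cases hcu : (c.getD u 0 == -1) = true
    · have hcueq : c.getD u 0 = -1 := by simpa using hcu
      have hInv2 := pv_seed_inv G c u huV hcueq hlen hInR hClosed
      have hmeas := pv_seed_meas G c u hlen
      -- a proper coloring aligned with the seeded state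
      obtain ⟨χ0, hχ0⟩ := hP
      obtain ⟨χ1, hχ1, hagr1⟩ := hExt χ0 hχ0
      obtain ⟨χ2, hχ2, hagr2⟩ := pv_flip G hPre c hClosed χ1 hχ1 hagr1 u huV hcueq hlen
      have htrue := pv_aloop_true G (pvFuelA G) (c.set u 1) [u] χ2 hInv2 hmeas hχ2 hagr2
      rcases pv_a_run G (pvFuelA G) (c.set u 1) [u] hInv2 hmeas with
        ⟨hok, heq2, hInvF⟩ | ⟨hbad, _⟩
      · have hr : pvALoop (pvGC G) G.length (pvFuelA G) (c.set u 1) [u] =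
            (true, pvAFLoop G G.length (pvFuelA G) (c.set u 1) [u]) := by
          rcases hres : pvALoop (pvGC G) G.length (pvFuelA G) (c.set u 1) [u] with ⟨b, cc⟩
          rw [hres] at hok heq2
          simp only at hok heq2
          rw [hok, heq2]
        have hstep : pvOptSeed G (some c) u =
            some (pvAFLoop G G.length (pvFuelA G) (c.set u 1) [u]) := by
          simp only [pvOptSeed]
          rw [hcu, hr]
          simp
        have hExtF : ∀ χ, PVProper G χ → ∃ χ', PVProper G χ' ∧
            PVAgrees G χ' (pvAFLoop G G.length (pvFuelA G) (c.set u 1) [u]) := by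
          intro χ hχ'
          obtain ⟨χa, hχa, hagra⟩ := hExt χ hχ'
          obtain ⟨χb, hχb, hagrb⟩ := pv_flip G hPre c hClosed χa hχa hagra u huV hcueq hlen
          exact ⟨χb, hχb,
            pv_af_agrees G (pvFuelA G) (c.set u 1) [u] χb hInv2.1.1 hInv2.1.2.1
              hInv2.1.2.2 hχb hagrb⟩
        rw [List.foldl_cons, hstep]
        exact ih _ (fun w hw => hl w (by simp [hw])) hInvF hExtF ⟨χ0, hχ0⟩
      · rw [htrue] at hbad
        cases hbad
    · have hstep : pvOptSeed G (some c) u = some c := by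
        simp only [pvOptSeed]
        rw [Bool.not_eq_true] at hcu
        rw [hcu]
        simp
      rw [List.foldl_cons, hstep]
      exact ih c (fun w hw => hl w (by simp [hw])) ⟨⟨hlen, hInR, hQok⟩, hClosed⟩ hExt hP

theorem pv_P_true (G : List (List Int)) (hPre : Pre_Biapertite G) (hP : PVP G) :
    Biapertite G = true := by
  rw [pv_biapertite_eq]
  have hInv0 : PVInv G (List.replicate G.length (-1 : Int)) [] :=
    ⟨⟨by simp, pv_replicate_InR G.length, fun u hu => absurd hu (List.not_mem_nil)⟩,
      pv_replicate_closed G⟩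
  have hExt0 : ∀ χ, PVProper G χ → ∃ χ', PVProper G χ' ∧
      PVAgrees G χ' (List.replicate G.length (-1 : Int)) := by
    intro χ hχ
    refine ⟨χ, hχ, ?_⟩
    intro v hv hc
    exfalso
    apply hc
    rw [List.getD_eq_getElem?_getD]
    simp [hv]
  obtain ⟨c', hfold, _, _⟩ := pv_outer_some G hPre (List.range G.length)
    (List.replicate G.length (-1)) (fun u hu => List.mem_range.mp hu) hInv0 hExt0 hP
  rw [hfold]
  rfl

-- ==== B-side: parity union-find ====

theorem pv_getD_set_self' {α : Type} (c : List α) (v : Nat) (x d : α) (h : v < c.length) :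
    (c.set v x).getD v d = x := by
  simp [List.getD_eq_getElem?_getD, h]

theorem pv_getD_set_ne' {α : Type} (c : List α) (v w : Nat) (x d : α) (h : w ≠ v) :
    (c.set v x).getD w d = c.getD w d := by
  simp [List.getD_eq_getElem?_getD, List.getElem?_set_ne (Ne.symm h)]

theorem pv_bool1 (x y p q : Bool) (h : xor x p ≠ xor y q) : y = xor x (p == q) := by
  cases x <;> cases y <;> cases p <;> cases q <;> simp_all

theorem pv_bool2 (x y p q : Bool) (h : xor x p ≠ xor y q) : x = xor y (p == q) := by
  cases x <;> cases y <;> cases p <;> cases q <;> simp_all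

theorem pv_bool3 (p q : Bool) : p ≠ xor q (p == q) := by
  cases p <;> cases q <;> simp_all

theorem pv_bool4 (p q : Bool) : xor p (p == q) ≠ q := by
  cases p <;> cases q <;> simp_all

theorem pv_bool5 (x q c : Bool) : xor (xor x q) c = xor x (xor c q) := by
  cases x <;> cases q <;> cases c <;> rfl

-- find with explicit accumulator: the accumulator xors out
theorem pv_findgo_acc (par : List Nat) (pr : List Bool) :
    ∀ (f : Nat) (v : Nat) (p : Bool),
      pvFindGo par pr f v p =
        ((pvFindGo par pr f v false).1, xor p (pvFindGo par pr f v false).2) := by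
  intro f
  induction f with
  | zero => intro v p; simp [pvFindGo]
  | succ f ih =>
    intro v p
    by_cases h : par.getD v v ≠ v
    · rw [pvFindGo, pvFindGo, if_pos h, if_pos h]
      rw [ih (par.getD v v) (p != pr.getD v false),
        ih (par.getD v v) (false != pr.getD v false)]
      cases p <;> cases pr.getD v false <;>
        cases (pvFindGo par pr f (par.getD v v) false).2 <;> rfl
    · rw [pvFindGo, pvFindGo, if_neg h, if_neg h]
      cases p <;> rfl

-- fuel irrelevance under the parent[v] ≤ v invariant
theorem pv_findgo_fuel (par : List Nat) (pr : List Bool)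
    (hinv : ∀ v, v < par.length → par.getD v v ≤ v) :
    ∀ (v : Nat), v < par.length → ∀ (f g : Nat), v < f → v < g → ∀ (p : Bool),
      pvFindGo par pr f v p = pvFindGo par pr g v p := by
  intro v
  induction v using Nat.strong_induction_on with
  | _ v ih =>
    intro hv f g hf hg p
    cases f with
    | zero => omega
    | succ f =>
      cases g with
      | zero => omega
      | succ g =>
        by_cases h : par.getD v v ≠ v
        · rw [pvFindGo, pvFindGo, if_pos h, if_pos h]
          have hlt : par.getD v v < v := lt_of_le_of_ne (hinv v hv) h
          exact ih (par.getD v v) hlt (hlt.trans hv) f g (by omega) (by omega) _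
        · rw [pvFindGo, pvFindGo, if_neg h, if_neg h]

def pvFR (s : List Nat × List Bool) (v : Nat) : Nat × Bool := pvFind s.1 s.2 v

def PVUFInv (G : List (List Int)) (s : List Nat × List Bool) : Prop :=
  s.1.length = G.length ∧ s.2.length = G.length ∧
  ∀ v, v < G.length → s.1.getD v v ≤ v

theorem pv_fr_root (G : List (List Int)) (s : List Nat × List Bool)
    (hinv : PVUFInv G s) (v : Nat) (hv : v < G.length)
    (hr : s.1.getD v v = v) : pvFR s v = (v, false) := by
  show pvFindGo s.1 s.2 (s.1.length + 1) v false = (v, false)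
  rw [pvFindGo, if_neg (fun h => h hr)]

theorem pv_fr_step (G : List (List Int)) (s : List Nat × List Bool)
    (hinv : PVUFInv G s) (v : Nat) (hv : v < G.length)
    (hr : s.1.getD v v ≠ v) :
    pvFR s v = ((pvFR s (s.1.getD v v)).1,
      xor (s.2.getD v false) (pvFR s (s.1.getD v v)).2) := by
  obtain ⟨hl1, hl2, hle⟩ := hinv
  have hinv' : ∀ w, w < s.1.length → s.1.getD w w ≤ w := by
    intro w hw; exact hle w (by rwa [hl1] at hw)
  have hwv : s.1.getD v v < v := lt_of_le_of_ne (hle v hv) hr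
  have hwlen : s.1.getD v v < s.1.length := by rw [hl1]; omega
  show pvFindGo s.1 s.2 (s.1.length + 1) v false = _
  rw [pvFindGo, if_pos hr]
  rw [pv_findgo_acc]
  rw [pv_findgo_fuel s.1 s.2 hinv' (s.1.getD v v) hwlen s.1.length (s.1.length + 1)
    hwlen (by omega) false]
  have hb : (false != s.2.getD v false) = s.2.getD v false := by
    cases s.2.getD v false <;> rfl
  rw [hb]
  rfl

theorem pv_fr_le (G : List (List Int)) (s : List Nat × List Bool)
    (hinv : PVUFInv G s) :
    ∀ (v : Nat), v < G.length → (pvFR s v).1 ≤ v ∧ (pvFR s v).1 < G.length ∧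
      s.1.getD (pvFR s v).1 (pvFR s v).1 = (pvFR s v).1 := by
  intro v
  induction v using Nat.strong_induction_on with
  | _ v ih =>
    intro hv
    by_cases hr : s.1.getD v v = v
    · rw [pv_fr_root G s hinv v hv hr]
      exact ⟨le_refl v, hv, hr⟩
    · rw [pv_fr_step G s hinv v hv hr]
      have hwv : s.1.getD v v < v := lt_of_le_of_ne (hinv.2.2 v hv) hr
      obtain ⟨h1, h2, h3⟩ := ih (s.1.getD v v) hwv (hwv.trans hv)
      exact ⟨le_of_lt (lt_of_le_of_lt h1 hwv), h2, h3⟩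

-- linking root a (a root, b < a) under b: the new find function, pointwise
theorem pv_fr_link (G : List (List Int)) (s : List Nat × List Bool)
    (hinv : PVUFInv G s) (a b : Nat) (q : Bool)
    (haV : a < G.length) (hbV : b < G.length) (hba : b < a)
    (hra : s.1.getD a a = a) (hrb : s.1.getD b b = b) :
    PVUFInv G (s.1.set a b, s.2.set a q) ∧
    ∀ v, v < G.length →
      pvFR (s.1.set a b, s.2.set a q) v =
        if (pvFR s v).1 = a then (b, xor (pvFR s v).2 q) else pvFR s v := by
  obtain ⟨hl1, hl2, hle⟩ := hinv
  have hinv0 : PVUFInv G s := ⟨hl1, hl2, hle⟩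
  have hinv' : PVUFInv G (s.1.set a b, s.2.set a q) := by
    refine ⟨by simp [hl1], by simp [hl2], ?_⟩
    intro v hv
    by_cases hva : v = a
    · subst hva
      show (s.1.set v b).getD v v ≤ v
      rw [pv_getD_set_self' s.1 v b v (by rw [hl1]; exact hv)]
      omega
    · show (s.1.set a b).getD v v ≤ v
      rw [pv_getD_set_ne' s.1 a v b v hva]
      exact hle v hv
  refine ⟨hinv', ?_⟩
  have key : ∀ v, v < G.length → (pvFR s v).1 ≠ a →
      pvFR (s.1.set a b, s.2.set a q) v = pvFR s v := by
    intro v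
    induction v using Nat.strong_induction_on with
    | _ v ih =>
      intro hv hne
      by_cases hr : s.1.getD v v = v
      · have hva : v ≠ a := by
          rw [pv_fr_root G s hinv0 v hv hr] at hne
          exact hne
        have hr' : (s.1.set a b).getD v v = v := by
          rw [pv_getD_set_ne' s.1 a v b v hva]; exact hr
        rw [pv_fr_root G _ hinv' v hv hr', pv_fr_root G s hinv0 v hv hr]
      · have hva : v ≠ a := fun e => hr (by rw [e]; exact hra)
        have hstep := pv_fr_step G s hinv0 v hv hr
        have hwv : s.1.getD v v < v := lt_of_le_of_ne (hle v hv) hr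
        have hwV : s.1.getD v v < G.length := hwv.trans hv
        have hne' : (pvFR s (s.1.getD v v)).1 ≠ a := by
          rw [hstep] at hne
          exact hne
        have hr' : (s.1.set a b).getD v v = s.1.getD v v := pv_getD_set_ne' s.1 a v b v hva
        have hstep' := pv_fr_step G _ hinv' v hv
          (show (s.1.set a b).getD v v ≠ v by rw [hr']; exact hr)
        rw [hstep', hstep]
        show (_, xor ((s.2.set a q).getD v false) _) = _
        rw [pv_getD_set_ne' s.2 a v q false hva]
        have e2 : (s.1.set a b, s.2.set a q).1.getD v v = s.1.getD v v := hr'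
        rw [e2, ih (s.1.getD v v) hwv hwV hne']
  intro v
  induction v using Nat.strong_induction_on with
  | _ v ih =>
    intro hv
    by_cases hr : s.1.getD v v = v
    · by_cases hva : v = a
      · subst hva
        have hFRa : pvFR s v = (v, false) := pv_fr_root G s hinv0 v hv hr
        rw [hFRa, if_pos (show ((v : Nat), false).1 = v from rfl)]
        have hsa : (s.1.set v b).getD v v = b :=
          pv_getD_set_self' s.1 v b v (by rw [hl1]; exact hv)
        have hstep' := pv_fr_step G (s.1.set v b, s.2.set v q) hinv' v hv
          (show (s.1.set v b).getD v v ≠ v by rw [hsa]; omega)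
        rw [hstep']
        have e1 : (s.1.set v b, s.2.set v q).1.getD v v = b := hsa
        rw [e1]
        have hq : (s.2.set v q).getD v false = q :=
          pv_getD_set_self' s.2 v q false (by rw [hl2]; exact hv)
        have e2 : (s.1.set v b, s.2.set v q).2.getD v false = q := hq
        rw [e2]
        have hFRb : pvFR s b = (b, false) := pv_fr_root G s hinv0 b hbV hrb
        have hkb : pvFR (s.1.set v b, s.2.set v q) b = pvFR s b :=
          key b hbV (by rw [hFRb]; show b ≠ v; omega)
        rw [hkb, hFRb]
        cases q <;> rfl
      · have hFR : pvFR s v = (v, false) := pv_fr_root G s hinv0 v hv hr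
        rw [key v hv (by rw [hFR]; exact hva), hFR,
          if_neg (show ¬(((v : Nat), false).1 = a) from hva)]
    · have hva : v ≠ a := fun e => hr (by rw [e]; exact hra)
      have hwv : s.1.getD v v < v := lt_of_le_of_ne (hle v hv) hr
      have hwV : s.1.getD v v < G.length := hwv.trans hv
      have hstep := pv_fr_step G s hinv0 v hv hr
      have hr' : (s.1.set a b).getD v v = s.1.getD v v := pv_getD_set_ne' s.1 a v b v hva
      have hstep' := pv_fr_step G (s.1.set a b, s.2.set a q) hinv' v hv
        (show (s.1.set a b).getD v v ≠ v by rw [hr']; exact hr)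
      rw [hstep']
      have e1 : (s.1.set a b, s.2.set a q).1.getD v v = s.1.getD v v := hr'
      have e2 : (s.1.set a b, s.2.set a q).2.getD v false = s.2.getD v false :=
        pv_getD_set_ne' s.2 a v q false hva
      rw [e1, e2, ih (s.1.getD v v) hwv hwV, hstep]
      by_cases hcond : (pvFR s (s.1.getD v v)).1 = a
      · rw [if_pos hcond,
          if_pos (show ((pvFR s (s.1.getD v v)).1,
            xor (s.2.getD v false) (pvFR s (s.1.getD v v)).2).1 = a from hcond)]
        have hx : ∀ (p c qq : Bool), xor p (xor c qq) = xor (xor p c) qq := by decide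
        show ((b : Nat), xor (s.2.getD v false) (xor (pvFR s (s.1.getD v v)).2 q)) =
            ((b : Nat), xor (xor (s.2.getD v false) (pvFR s (s.1.getD v v)).2) q)
        rw [hx]
      · rw [if_neg hcond,
          if_neg (show ¬(((pvFR s (s.1.getD v v)).1,
            xor (s.2.getD v false) (pvFR s (s.1.getD v v)).2).1 = a) from hcond)]

-- the semantic invariants carried through the double loop
def PVGood (G : List (List Int)) (s : List Nat × List Bool) : Prop :=
  PVUFInv G s ∧
  ∀ χ, PVProper G χ → ∀ v, v < G.length → χ v = xor (χ (pvFR s v).1) (pvFR s v).2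

def PVSat (G : List (List Int)) (s : List Nat × List Bool) (i j : Nat) : Prop :=
  (pvFR s i).1 = (pvFR s j).1 ∧ (pvFR s i).2 ≠ (pvFR s j).2

theorem pv_ufstep_id (G : List (List Int)) (i j : Nat) (par : List Nat) (pr : List Bool)
    (hE : ¬ pvEdge G i j = true) :
    pvUFStep G i (some (par, pr)) j = some (par, pr) := by
  simp only [pvUFStep]
  rw [if_neg (show ¬(((i != j) && ((G.getD i []).getD j 0 == 0)) = true) from hE)]

theorem pv_ufstep_eq (G : List (List Int)) (i j : Nat) (par : List Nat) (pr : List Bool)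
    (hE : pvEdge G i j = true) :
    pvUFStep G i (some (par, pr)) j =
      (if (pvFind par pr i).1 = (pvFind par pr j).1 then
        (if (pvFind par pr i).2 = (pvFind par pr j).2 then none else some (par, pr))
      else
        if (pvFind par pr i).1 < (pvFind par pr j).1 then
          some (par.set (pvFind par pr j).1 (pvFind par pr i).1,
            pr.set (pvFind par pr j).1 ((pvFind par pr i).2 == (pvFind par pr j).2))
        else
          some (par.set (pvFind par pr i).1 (pvFind par pr j).1,
            pr.set (pvFind par pr i).1 ((pvFind par pr i).2 == (pvFind par pr j).2))) := by
  simp only [pvUFStep]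
  rw [if_pos (show (((i != j) && ((G.getD i []).getD j 0 == 0)) = true) from hE)]

theorem pv_uf_step (G : List (List Int)) (i j : Nat)
    (hi : i < G.length) (hj : j < G.length)
    (s : List Nat × List Bool) (hG : PVGood G s) :
    (pvUFStep G i (some s) j = none → ¬ PVP G) ∧
    (∀ s', pvUFStep G i (some s) j = some s' →
      PVGood G s' ∧ (pvEdge G i j = true → PVSat G s' i j) ∧
      (∀ a b, a < G.length → b < G.length → PVSat G s a b → PVSat G s' a b)) := by
  obtain ⟨par, pr⟩ := s
  obtain ⟨hinv, hsem⟩ := hG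
  by_cases hE : pvEdge G i j = true
  · have hstep := pv_ufstep_eq G i j par pr hE
    obtain ⟨hle_i, hiV', hroot_i⟩ := pv_fr_le G (par, pr) hinv i hi
    obtain ⟨hle_j, hjV', hroot_j⟩ := pv_fr_le G (par, pr) hinv j hj
    by_cases hroot : (pvFind par pr i).1 = (pvFind par pr j).1
    · by_cases hpar : (pvFind par pr i).2 = (pvFind par pr j).2
      · constructor
        · intro _ hPP
          obtain ⟨χ, hχ⟩ := hPP
          have hIJ := hχ i j hi hj hE
          have hEqI := hsem χ hχ i hi
          have hEqJ := hsem χ hχ j hj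
          apply hIJ
          rw [hEqI, hEqJ,
            show (pvFR (par, pr) i).1 = (pvFind par pr j).1 from hroot,
            show (pvFR (par, pr) i).2 = (pvFind par pr j).2 from hpar]
          rfl
        · intro s' h
          rw [hstep, if_pos hroot, if_pos hpar] at h
          cases h
      · constructor
        · intro h
          rw [hstep, if_pos hroot, if_neg hpar] at h
          cases h
        · intro s' h
          rw [hstep, if_pos hroot, if_neg hpar] at h
          injection h with h
          subst h
          exact ⟨⟨hinv, hsem⟩, fun _ => ⟨hroot, hpar⟩, fun a b _ _ hs => hs⟩
    · by_cases hlt : (pvFind par pr i).1 < (pvFind par pr j).1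
      · obtain ⟨hinv', hform⟩ := pv_fr_link G (par, pr) hinv
          (pvFind par pr j).1 (pvFind par pr i).1
          ((pvFind par pr i).2 == (pvFind par pr j).2)
          hjV' hiV' hlt hroot_j hroot_i
        constructor
        · intro h
          rw [hstep, if_neg hroot, if_pos hlt] at h
          cases h
        · intro s' h
          rw [hstep, if_neg hroot, if_pos hlt] at h
          injection h with h
          subst h
          refine ⟨⟨hinv', ?_⟩, ?_, ?_⟩
          · intro χ hχ v hv
            have hIJ := hχ i j hi hj hE
            have hEqI := hsem χ hχ i hi
            have hEqJ := hsem χ hχ j hj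
            have hlink : χ (pvFind par pr j).1 =
                xor (χ (pvFind par pr i).1)
                  ((pvFind par pr i).2 == (pvFind par pr j).2) :=
              pv_bool1 (χ (pvFR (par, pr) i).1) (χ (pvFR (par, pr) j).1)
                (pvFR (par, pr) i).2 (pvFR (par, pr) j).2
                (by rw [← hEqI, ← hEqJ]; exact hIJ)
            rw [hform v hv]
            by_cases hc : (pvFR (par, pr) v).1 = (pvFind par pr j).1
            · rw [if_pos hc]
              have hbase := hsem χ hχ v hv
              rw [hc] at hbase
              show χ v = xor (χ (pvFind par pr i).1)
                (xor (pvFR (par, pr) v).2 ((pvFind par pr i).2 == (pvFind par pr j).2))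
              rw [hbase, hlink]
              exact pv_bool5 _ _ _
            · rw [if_neg hc]
              exact hsem χ hχ v hv
          · intro _
            have hfi := hform i hi
            have hfj := hform j hj
            rw [if_neg (show ¬((pvFR (par, pr) i).1 = (pvFind par pr j).1) from hroot)]
              at hfi
            rw [if_pos (show (pvFR (par, pr) j).1 = (pvFind par pr j).1 from rfl)] at hfj
            exact ⟨by rw [hfi, hfj]; rfl, by rw [hfi, hfj]; exact pv_bool3 _ _⟩
          · intro a b haV hbV hs
            obtain ⟨hr12, hp12⟩ := hs
            have hfa := hform a haV
            have hfb := hform b hbV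
            by_cases hca : (pvFR (par, pr) a).1 = (pvFind par pr j).1
            · have hcb : (pvFR (par, pr) b).1 = (pvFind par pr j).1 := by
                rw [← hr12]; exact hca
              rw [if_pos hca] at hfa
              rw [if_pos hcb] at hfb
              exact ⟨by rw [hfa, hfb], by rw [hfa, hfb]; exact pv_xor_ne _ _ _ hp12⟩
            · have hcb : ¬((pvFR (par, pr) b).1 = (pvFind par pr j).1) := by
                rw [← hr12]; exact hca
              rw [if_neg hca] at hfa
              rw [if_neg hcb] at hfb
              exact ⟨by rw [hfa, hfb]; exact hr12, by rw [hfa, hfb]; exact hp12⟩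
      · have hgt : (pvFind par pr j).1 < (pvFind par pr i).1 :=
          lt_of_le_of_ne (Nat.not_lt.mp hlt) (fun e => hroot e.symm)
        obtain ⟨hinv', hform⟩ := pv_fr_link G (par, pr) hinv
          (pvFind par pr i).1 (pvFind par pr j).1
          ((pvFind par pr i).2 == (pvFind par pr j).2)
          hiV' hjV' hgt hroot_i hroot_j
        constructor
        · intro h
          rw [hstep, if_neg hroot, if_neg hlt] at h
          cases h
        · intro s' h
          rw [hstep, if_neg hroot, if_neg hlt] at h
          injection h with h
          subst h
          refine ⟨⟨hinv', ?_⟩, ?_, ?_⟩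
          · intro χ hχ v hv
            have hIJ := hχ i j hi hj hE
            have hEqI := hsem χ hχ i hi
            have hEqJ := hsem χ hχ j hj
            have hlink : χ (pvFind par pr i).1 =
                xor (χ (pvFind par pr j).1)
                  ((pvFind par pr i).2 == (pvFind par pr j).2) := by
              have h2 := pv_bool2 (χ (pvFR (par, pr) i).1) (χ (pvFR (par, pr) j).1)
                (pvFR (par, pr) i).2 (pvFR (par, pr) j).2
                (by rw [← hEqI, ← hEqJ]; exact hIJ)
              exact h2
            rw [hform v hv]
            by_cases hc : (pvFR (par, pr) v).1 = (pvFind par pr i).1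
            · rw [if_pos hc]
              have hbase := hsem χ hχ v hv
              rw [hc] at hbase
              show χ v = xor (χ (pvFind par pr j).1)
                (xor (pvFR (par, pr) v).2 ((pvFind par pr i).2 == (pvFind par pr j).2))
              rw [hbase, hlink]
              exact pv_bool5 _ _ _
            · rw [if_neg hc]
              exact hsem χ hχ v hv
          · intro _
            have hfi := hform i hi
            have hfj := hform j hj
            rw [if_pos (show (pvFR (par, pr) i).1 = (pvFind par pr i).1 from rfl)] at hfi
            rw [if_neg (show ¬((pvFR (par, pr) j).1 = (pvFind par pr i).1) from
              fun e => hroot e.symm)] at hfj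
            exact ⟨by rw [hfi, hfj]; rfl, by rw [hfi, hfj]; exact pv_bool4 _ _⟩
          · intro a b haV hbV hs
            obtain ⟨hr12, hp12⟩ := hs
            have hfa := hform a haV
            have hfb := hform b hbV
            by_cases hca : (pvFR (par, pr) a).1 = (pvFind par pr i).1
            · have hcb : (pvFR (par, pr) b).1 = (pvFind par pr i).1 := by
                rw [← hr12]; exact hca
              rw [if_pos hca] at hfa
              rw [if_pos hcb] at hfb
              exact ⟨by rw [hfa, hfb], by rw [hfa, hfb]; exact pv_xor_ne _ _ _ hp12⟩
            · have hcb : ¬((pvFR (par, pr) b).1 = (pvFind par pr i).1) := by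
                rw [← hr12]; exact hca
              rw [if_neg hca] at hfa
              rw [if_neg hcb] at hfb
              exact ⟨by rw [hfa, hfb]; exact hr12, by rw [hfa, hfb]; exact hp12⟩
  · have hstep := pv_ufstep_id G i j par pr hE
    constructor
    · intro h
      rw [hstep] at h
      cases h
    · intro s' h
      rw [hstep] at h
      injection h with h
      subst h
      exact ⟨⟨hinv, hsem⟩, fun h' => absurd h' hE, fun a b _ _ hs => hs⟩

theorem pv_ufstep_none (G : List (List Int)) (i : Nat) (l : List Nat) :
    l.foldl (pvUFStep G i) none = none := by
  induction l with
  | nil => rfl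
  | cons j js ih => simpa [pvUFStep] using ih

theorem pv_uf_inner (G : List (List Int)) (i : Nat) (hi : i < G.length) (l : List Nat) :
    ∀ (s : List Nat × List Bool), (∀ j ∈ l, j < G.length) → PVGood G s →
      (l.foldl (pvUFStep G i) (some s) = none → ¬ PVP G) ∧
      (∀ s', l.foldl (pvUFStep G i) (some s) = some s' →
        PVGood G s' ∧ (∀ j ∈ l, pvEdge G i j = true → PVSat G s' i j) ∧
        (∀ a b, a < G.length → b < G.length → PVSat G s a b → PVSat G s' a b)) := by
  induction l with
  | nil =>
    intro s _ hGood
    constructor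
    · intro h; cases h
    · intro s' h
      simp only [List.foldl_nil] at h
      injection h with h
      subst h
      exact ⟨hGood, by simp, fun a b _ _ hs => hs⟩
  | cons j js ih =>
    intro s hl hGood
    have hjV : j < G.length := hl j (by simp)
    obtain ⟨hnone, hsome⟩ := pv_uf_step G i j hi hjV s hGood
    rcases hst : pvUFStep G i (some s) j with _ | s1
    · rw [List.foldl_cons, hst, pv_ufstep_none]
      exact ⟨fun _ => hnone hst, fun s' h => absurd h (by simp)⟩
    · obtain ⟨hG1, hSat1, hPres1⟩ := hsome s1 hst
      obtain ⟨ihn, ihs⟩ := ih s1 (fun w hw => hl w (by simp [hw])) hG1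
      rw [List.foldl_cons, hst]
      refine ⟨ihn, ?_⟩
      intro s' h
      obtain ⟨hG', hSat', hPres'⟩ := ihs s' h
      refine ⟨hG', ?_, fun a b ha hb hs => hPres' a b ha hb (hPres1 a b ha hb hs)⟩
      intro w hw hEw
      rcases List.mem_cons.mp hw with he | hw'
      · subst he
        exact hPres' i w hi hjV (hSat1 hEw)
      · exact hSat' w hw' hEw

theorem pv_uf_outer_none (G : List (List Int)) (m : List Nat) :
    m.foldl (fun st i => (List.range G.length).foldl (pvUFStep G i) st) none = none := by
  induction m with
  | nil => rfl
  | cons i ms ih => simpa [pv_ufstep_none] using ih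

theorem pv_uf_outer (G : List (List Int)) (m : List Nat) :
    ∀ (s : List Nat × List Bool), (∀ i ∈ m, i < G.length) → PVGood G s →
      (m.foldl (fun st i => (List.range G.length).foldl (pvUFStep G i) st) (some s) = none →
        ¬ PVP G) ∧
      (∀ s', m.foldl (fun st i => (List.range G.length).foldl (pvUFStep G i) st) (some s) =
          some s' →
        PVGood G s' ∧
        (∀ i ∈ m, ∀ j, j < G.length → pvEdge G i j = true → PVSat G s' i j) ∧
        (∀ a b, a < G.length → b < G.length → PVSat G s a b → PVSat G s' a b)) := by
  induction m with
  | nil =>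
    intro s _ hGood
    constructor
    · intro h; cases h
    · intro s' h
      simp only [List.foldl_nil] at h
      injection h with h
      subst h
      exact ⟨hGood, by simp, fun a b _ _ hs => hs⟩
  | cons i ms ih =>
    intro s hl hGood
    have hiV : i < G.length := hl i (by simp)
    obtain ⟨hnone_in, hsome_in⟩ := pv_uf_inner G i hiV (List.range G.length) s
      (fun w hw => List.mem_range.mp hw) hGood
    rcases hst : (List.range G.length).foldl (pvUFStep G i) (some s) with _ | s1
    · simp only [List.foldl_cons]
      rw [hst, pv_uf_outer_none]
      exact ⟨fun _ => hnone_in hst, fun s' h => absurd h (by simp)⟩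
    · obtain ⟨hG1, hSat1, hPres1⟩ := hsome_in s1 hst
      obtain ⟨ihn, ihs⟩ := ih s1 (fun w hw => hl w (by simp [hw])) hG1
      simp only [List.foldl_cons]
      rw [hst]
      refine ⟨ihn, ?_⟩
      intro s' h
      obtain ⟨hG', hSat', hPres'⟩ := ihs s' h
      refine ⟨hG', ?_, fun a b ha hb hs => hPres' a b ha hb (hPres1 a b ha hb hs)⟩
      intro w hw jj hjjV hEw
      rcases List.mem_cons.mp hw with he | hw'
      · subst he
        exact hPres' w jj hiV hjjV (hSat1 jj (List.mem_range.mpr hjjV) hEw)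
      · exact hSat' w hw' jj hjjV hEw

theorem pv_good_init (G : List (List Int)) :
    PVGood G (List.range G.length, List.replicate G.length false) := by
  have hroot : ∀ v, v < G.length → (List.range G.length).getD v v = v := by
    intro v hv
    rw [List.getD_eq_getElem?_getD]
    simp [hv]
  have hinv : PVUFInv G (List.range G.length, List.replicate G.length false) := by
    refine ⟨by simp, by simp, ?_⟩
    intro v hv
    rw [show (List.range G.length, List.replicate G.length false).1.getD v v = v from
      hroot v hv]
  refine ⟨hinv, ?_⟩
  intro χ hχ v hv
  rw [pv_fr_root G _ hinv v hv (hroot v hv)]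
  cases χ v <;> rfl

theorem pv_alt_iff (G : List (List Int)) : Biapertite_alt G = true ↔ PVP G := by
  unfold Biapertite_alt
  constructor
  · intro h
    rcases hf : (List.range G.length).foldl
        (fun st i => (List.range G.length).foldl (pvUFStep G i) st)
        (some (List.range G.length, List.replicate G.length false)) with _ | s'
    · rw [hf] at h; cases h
    · obtain ⟨hG', hSat, _⟩ := (pv_uf_outer G (List.range G.length) _
        (fun w hw => List.mem_range.mp hw) (pv_good_init G)).2 s' hf
      refine ⟨fun v => (pvFR s' v).2, ?_⟩
      intro u v huV hvV hE
      exact (hSat u (List.mem_range.mpr huV) v hvV hE).2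
  · intro hP
    rcases hf : (List.range G.length).foldl
        (fun st i => (List.range G.length).foldl (pvUFStep G i) st)
        (some (List.range G.length, List.replicate G.length false)) with _ | s'
    · exact absurd hP ((pv_uf_outer G (List.range G.length) _
        (fun w hw => List.mem_range.mp hw) (pv_good_init G)).1 hf)
    · rfl

-- ---- final assembly ----

theorem pv_main (G : List (List Int)) (hPre : Pre_Biapertite G) :
    Biapertite G = Biapertite_alt G := by
  by_cases hP : PVP G
  · rw [pv_P_true G hPre hP, (pv_alt_iff G).mpr hP]
  · rcases hA : Biapertite G with _ | _
    · rcases hB : Biapertite_alt G with _ | _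
      · rfl
      · exact absurd ((pv_alt_iff G).mp hB) hP
    · exact absurd (pv_true_P G hA) hP

-- ===== VERDICT (by name: the statement is the Claim_ definition above) =====
theorem Biapertite_spec : Claim_equal_Biapertite := by
  intro G _ hPre
  unfold Spec_Biapertite
  exact pv_main G hPre
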